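-- pv_equiv track=rewrite | github.com/Eruhitsuji/SFGPL | SFGPL/SFGPL.py | __pyCodeSpaceReplace
-- ===== SOURCE A (Python) =====
-- def __pyCodeSpaceReplace(tmp_str:str):
--     pre_space_chars=[]
--     post_space_chars=["(","{","[",","]
--     pre_and_post_space_chars=[")","}","]"]
--
--     pre_space_chars_r=[" "+c for c in pre_space_chars]
--     post_space_chars_r=[c+" " for c in post_space_chars]
--     pre_and_post_space_chars_r=[" "+c+" " for c in pre_and_post_space_chars]
--
--     before_replace_chars=pre_space_chars+post_space_chars+pre_and_post_space_chars
--     after_replace_chars=pre_space_chars_r+post_space_chars_r+pre_and_post_space_chars_r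
--
--     for i in range(len(before_replace_chars)):
--         tmp_str=tmp_str.replace(before_replace_chars[i],after_replace_chars[i])
--     return tmp_str
-- ===== SOURCE B (Python) =====
-- def __pyCodeSpaceReplace(tmp_str: str):
--     trailing = {"(", "{", "[", ","}
--     both = {")", "}", "]"}
--     out = []
--     for c in tmp_str:
--         if c in trailing:
--             out.append(c + " ")
--         elif c in both:
--             out.append(" " + c + " ")
--         else:
--             out.append(c)
--     return "".join(out)
-- ===== Notes on version B (the rewrite author's own statement) =====
-- stated objective: simpler
-- what changed: Replaces six sequential whole-string str.replace passes with a single character-by-character traversal that appends each character with a trailing space (open brackets and comma), surrounding spaces (close brackets), or unchanged, then joins the pieces.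
import Mathlib
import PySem

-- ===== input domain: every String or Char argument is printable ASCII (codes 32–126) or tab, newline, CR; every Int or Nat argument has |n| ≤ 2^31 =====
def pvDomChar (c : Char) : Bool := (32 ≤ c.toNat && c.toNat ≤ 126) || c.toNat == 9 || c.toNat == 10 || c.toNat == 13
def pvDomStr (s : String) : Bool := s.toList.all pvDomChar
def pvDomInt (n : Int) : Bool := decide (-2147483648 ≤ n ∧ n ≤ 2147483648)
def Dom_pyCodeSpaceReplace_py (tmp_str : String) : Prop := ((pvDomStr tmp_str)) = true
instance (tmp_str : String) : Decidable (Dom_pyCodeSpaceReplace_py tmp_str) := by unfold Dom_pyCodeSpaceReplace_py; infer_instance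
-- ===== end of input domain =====

-- B replaces A's six sequential str.replace passes with a single character-by-character
-- traversal (simpler, one pass); return values proved equal on all of Dom.


-- ===== PORT A =====
def pyCodeSpaceReplace_py (tmp_str : String) : String :=
  let pre_space_chars : List String := []
  let post_space_chars : List String := ["(", "{", "[", ","]
  let pre_and_post_space_chars : List String := [")", "}", "]"]
  let pre_space_chars_r := pre_space_chars.map (fun c => " " ++ c)
  let post_space_chars_r := post_space_chars.map (fun c => c ++ " ")
  let pre_and_post_space_chars_r := pre_and_post_space_chars.map (fun c => " " ++ c ++ " ")
  let before_replace_chars := pre_space_chars ++ post_space_chars ++ pre_and_post_space_chars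
  let after_replace_chars := pre_space_chars_r ++ post_space_chars_r ++ pre_and_post_space_chars_r
  (PySem.List.pyRange 0 before_replace_chars.length 1).foldl
    (fun s i =>
      PySem.Str.replace s ((PySem.List.pyGet? before_replace_chars i).getD "")
        ((PySem.List.pyGet? after_replace_chars i).getD ""))
    tmp_str

-- ===== PORT B =====
def pyCodeSpaceReplace_py_alt (tmp_str : String) : String :=
  String.ofList (tmp_str.toList.flatMap (fun c =>
    if c = '(' ∨ c = '{' ∨ c = '[' ∨ c = ',' then [c, ' ']
    else if c = ')' ∨ c = '}' ∨ c = ']' then [' ', c, ' ']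
    else [c]))

-- ===== PRECONDITION & SPEC =====
def Spec_pyCodeSpaceReplace_py (tmp_str : String) (out : String) : Prop := out = pyCodeSpaceReplace_py_alt tmp_str
instance (tmp_str : String) (out : String) : Decidable (Spec_pyCodeSpaceReplace_py tmp_str out) := by unfold Spec_pyCodeSpaceReplace_py; infer_instance

-- ===== CLAIM (what is proved, stated in full; the proofs are below) =====
def Claim_equal_pyCodeSpaceReplace_py : Prop := ∀ (tmp_str : String), Dom_pyCodeSpaceReplace_py tmp_str → Spec_pyCodeSpaceReplace_py tmp_str (pyCodeSpaceReplace_py tmp_str)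

-- ===== LEMMAS AND PROOFS =====

-- the replacement string for a target character
def pvRep (c : Char) : List Char :=
  if c = ')' ∨ c = '}' ∨ c = ']' then [' ', c, ' '] else [c, ' ']

-- fold of single-character replaces over a list of targets
def pvR (ts : List Char) (cs : List Char) : List Char :=
  ts.foldl (fun s t => PySem.Chars.replace s [t] (pvRep t)) cs

-- pointwise substitution realised by a list of targets
def pvG (ts : List Char) (x : Char) : List Char :=
  if x ∈ ts then pvRep x else [x]

theorem pv_go_single (c : Char) (new : List Char) :
    ∀ (fuel : Nat) (l acc : List Char), l.length ≤ fuel →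
    PySem.Chars.replace.go [c] new fuel l acc
      = acc.reverse ++ l.flatMap (fun x => if x = c then new else [x]) := by
  intro fuel
  induction fuel with
  | zero =>
    intro l acc h
    have : l = [] := List.eq_nil_of_length_eq_zero (Nat.le_zero.mp h)
    subst this
    simp [PySem.Chars.replace.go]
  | succ n ih =>
    intro l acc h
    cases l with
    | nil => simp [PySem.Chars.replace.go]
    | cons c' t =>
      simp only [PySem.Chars.replace.go]
      by_cases hc : c = c'
      · subst hc
        have hp : List.isPrefixOf [c] (c :: t) = true := by
          simp [List.isPrefixOf]
        simp only [hp, if_pos]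
        rw [ih _ _ (by simpa using Nat.le_of_succ_le_succ h)]
        simp
      · have hp : List.isPrefixOf [c] (c' :: t) = false := by
          simp [List.isPrefixOf, hc]
        simp only [hp]
        rw [if_neg (by simp)]
        rw [ih _ _ (by simpa using Nat.le_of_succ_le_succ h)]
        simp [Ne.symm hc]

theorem pv_replace_single (cs : List Char) (c : Char) (new : List Char) :
    PySem.Chars.replace cs [c] new
      = cs.flatMap (fun x => if x = c then new else [x]) := by
  rw [PySem.Chars.replace, if_neg (by simp)]
  exact pv_go_single c new cs.length cs [] le_rfl

theorem pv_main (ts : List Char) :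
    ∀ (cs : List Char), ts.Nodup →
    (∀ t ∈ ts, ∀ y ∈ pvRep t, y = t ∨ y = ' ') → (' ' ∉ ts) →
    pvR ts cs = cs.flatMap (pvG ts) := by
  induction ts with
  | nil =>
    intro cs _ _ _
    simp [pvR]
    exact (List.flatMap_singleton' cs).symm
  | cons t ts ih =>
    intro cs hnd hrep hsp
    have hnt : t ∉ ts := (List.nodup_cons.mp hnd).1
    have hnd' : ts.Nodup := (List.nodup_cons.mp hnd).2
    have hsp' : ' ' ∉ ts := fun h => hsp (List.mem_cons_of_mem _ h)
    have step : pvR (t :: ts) cs = pvR ts (cs.flatMap (fun x => if x = t then pvRep t else [x])) := by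
      simp [pvR, pv_replace_single]
    rw [step, ih _ hnd' (fun u hu => hrep u (List.mem_cons_of_mem _ hu)) hsp',
        List.flatMap_assoc]
    apply List.flatMap_congr
    intro x _
    by_cases hx : x = t
    · subst hx
      have : ∀ y ∈ pvRep x, pvG ts y = [y] := by
        intro y hy
        rcases hrep x (List.mem_cons_self) y hy with h | h
        · subst h; simp [pvG, hnt]
        · subst h; simp [pvG, hsp']
      rw [if_pos rfl]
      calc (pvRep x).flatMap (pvG ts)
          = (pvRep x).flatMap (fun y => [y]) := List.flatMap_congr this
        _ = pvRep x := by simp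
        _ = pvG (x :: ts) x := by simp [pvG]
    · simp only [if_neg hx]
      simp [pvG, hx]

set_option maxHeartbeats 1000000 in
theorem pv_portA_eq (tmp_str : String) :
    pyCodeSpaceReplace_py tmp_str
      = String.ofList (pvR ['(', '{', '[', ',', ')', '}', ']'] tmp_str.toList) := by
  unfold pyCodeSpaceReplace_py
  show (PySem.List.pyRange 0 7 1).foldl _ tmp_str = _
  rw [show PySem.List.pyRange 0 7 1 = [0, 1, 2, 3, 4, 5, 6] from by decide]
  simp only [List.foldl_cons, List.foldl_nil, pvR, pvRep]
  norm_num [PySem.List.pyGet?, PySem.List.pyIdx?, PySem.Str.replace, String.toList_ofList]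
  simp

theorem pyCodeSpaceReplace_py_eq (tmp_str : String) :
    pyCodeSpaceReplace_py tmp_str = pyCodeSpaceReplace_py_alt tmp_str := by
  have hrep : ∀ t ∈ (['(', '{', '[', ',', ')', '}', ']'] : List Char),
      ∀ y ∈ pvRep t, y = t ∨ y = ' ' := by
    intro t ht y hy
    fin_cases ht <;> simp_all [pvRep] <;> tauto
  rw [pv_portA_eq, pv_main _ _ (by decide) hrep (by decide)]
  unfold pyCodeSpaceReplace_py_alt
  congr 1
  apply List.flatMap_congr
  intro x _
  by_cases h1 : x = '(' ∨ x = '{' ∨ x = '[' ∨ x = ','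
  · rcases h1 with h | h | h | h <;> subst h <;> simp [pvG, pvRep]
  · by_cases h2 : x = ')' ∨ x = '}' ∨ x = ']'
    · rcases h2 with h | h | h <;> subst h <;> simp [pvG, pvRep]
    · push Not at h1 h2
      obtain ⟨a1, a2, a3, a4⟩ := h1
      obtain ⟨b1, b2, b3⟩ := h2
      simp [pvG, a1, a2, a3, a4, b1, b2, b3]

-- ===== VERDICT (by name: the statement is the Claim_ definition above) =====
theorem pyCodeSpaceReplace_py_spec : Claim_equal_pyCodeSpaceReplace_py := by
  intro tmp_str _
  unfold Spec_pyCodeSpaceReplace_py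
  exact pyCodeSpaceReplace_py_eq tmp_str
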